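-- pv_equiv track=rewrite | github.com/kroffske/locus | src/project_analyzer/core/processor.py | _extract_header_comments
-- ===== SOURCE A (Python) =====
-- from typing import List
--
-- def _extract_header_comments(content: str) -> List[str]:
--     """Extracts comments from the top of a file."""
--     comments = []
--     for line in content.splitlines():
--         stripped = line.strip()
--         if stripped.startswith("#"):
--             comments.append(stripped.lstrip("# ").strip())
--         elif stripped:
--             break
--     return comments
-- ===== SOURCE B (Python) =====
-- from typing import List
--
-- def _extract_header_comments(content: str) -> List[str]:
--     """Classification-table approach: label every line once ('T' terminator,
--     'C' comment, 'B' blank), locate the first terminator with an index search,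
--     then collect the cleaned comment lines before it."""
--     lines = content.splitlines()
--     kinds = [
--         "T" if (s := line.strip()) and not s.startswith("#") else ("C" if s else "B")
--         for line in lines
--     ]
--     cut = kinds.index("T") if "T" in kinds else len(lines)
--     return [
--         line.strip().lstrip("# ").strip()
--         for line, kind in zip(lines[:cut], kinds)
--         if kind == "C"
--     ]
-- ===== Notes on version B (the rewrite author's own statement) =====
-- stated objective: alternative
-- what changed: Replaces the single early-exit loop by a classification-table algorithm: every line is labelled once (terminator/comment/blank), the cut point is found by an index search over the labels, and the comment lines before the cut are cleaned in a final zip/filter pass.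
import Mathlib
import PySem

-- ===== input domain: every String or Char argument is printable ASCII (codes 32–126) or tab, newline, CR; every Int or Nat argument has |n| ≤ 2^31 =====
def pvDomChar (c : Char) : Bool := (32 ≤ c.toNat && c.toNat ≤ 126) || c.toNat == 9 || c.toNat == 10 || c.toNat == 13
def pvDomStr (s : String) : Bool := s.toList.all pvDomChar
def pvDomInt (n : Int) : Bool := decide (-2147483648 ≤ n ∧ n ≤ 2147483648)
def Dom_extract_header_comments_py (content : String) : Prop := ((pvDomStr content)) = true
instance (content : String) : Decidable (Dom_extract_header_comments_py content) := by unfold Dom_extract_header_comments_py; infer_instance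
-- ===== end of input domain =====

-- B replaces A's early-exit collecting loop by a classification table + index search + zip/filter collection; same O(n) cost.

-- ===== PORT A =====
-- lstrip("# ") ported by hand as dropWhile over the two characters (exact: Python drops leading chars from the set {'#',' '})
def pvLstripHashSpace (l : List Char) : List Char := l.dropWhile (fun c => c == '#' || c == ' ')

-- the for-loop with break, as structural recursion over the lines
def extract_header_comments_py_loop : List (List Char) → List String
  | [] => []
  | line :: rest =>
    let stripped := PySem.Chars.strip line
    if PySem.Chars.startswith stripped ['#'] then
      String.mk (PySem.Chars.strip (pvLstripHashSpace stripped)) :: extract_header_comments_py_loop rest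
    else if stripped ≠ [] then []
    else extract_header_comments_py_loop rest

def extract_header_comments_py (content : String) : List String :=
  extract_header_comments_py_loop ((PySem.Str.splitlines content).map String.toList)

-- ===== PORT B =====
-- the per-line label: 'T' terminator, 'C' comment, 'B' blank (Source B's conditional expression)
def pvClassify (l : List Char) : Char :=
  let s := PySem.Chars.strip l
  if !s.isEmpty && !(PySem.Chars.startswith s ['#']) then 'T'
  else if !s.isEmpty then 'C' else 'B'

def extract_header_comments_py_alt (content : String) : List String :=
  let lines := (PySem.Str.splitlines content).map String.toList
  let kinds := lines.map pvClassify
  let cut : Nat := if kinds.contains 'T' then (PySem.List.index? kinds 'T').getD 0 else lines.length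
  ((PySem.List.slice lines none (some (cut : Int))).zip kinds).filterMap
    (fun p => if p.2 == 'C'
      then some (String.mk (PySem.Chars.strip (pvLstripHashSpace (PySem.Chars.strip p.1))))
      else none)

-- ===== PRECONDITION & SPEC =====
def Spec_extract_header_comments_py (content : String) (out : List String) : Prop := out = extract_header_comments_py_alt content
instance (content : String) (out : List String) : Decidable (Spec_extract_header_comments_py content out) := by unfold Spec_extract_header_comments_py; infer_instance

-- ===== CLAIM =====
def Claim_equal_extract_header_comments_py : Prop := ∀ (content : String), Dom_extract_header_comments_py content → Spec_extract_header_comments_py content (extract_header_comments_py content)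

-- ===== LEMMAS AND PROOFS =====
def pvClean (l : List Char) : String := String.mk (PySem.Chars.strip (pvLstripHashSpace (PySem.Chars.strip l)))

def pvTwoPass (ls : List (List Char)) : List String :=
  (ls.takeWhile (fun l => pvClassify l != 'T')).filterMap
    (fun l => if pvClassify l == 'C' then some (pvClean l) else none)

theorem pv_cut_take (ks : List Char) :
    (if ks.contains 'T' then (PySem.List.index? ks 'T').getD 0 else ks.length)
      = (ks.takeWhile (fun k => k != 'T')).length := by
  induction ks with
  | nil => simp
  | cons k ks ih =>
    by_cases hk : k = 'T'
    · subst hk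
      rw [if_pos (by simp), PySem.List.index?_cons_self]
      simp [List.takeWhile_cons]
    · rw [PySem.List.index?_cons_of_ne ks hk]
      by_cases hc : ks.contains 'T'
      · have hm : 'T' ∈ ks := by simpa using hc
        obtain ⟨j, hj⟩ := Option.isSome_iff_exists.mp ((PySem.List.index?_isSome_iff ks 'T').mpr hm)
        rw [if_pos (by simp [hm]), hj]
        have h2 := ih
        rw [if_pos hc, hj] at h2
        simp only [Option.map_some, Option.getD_some] at h2 ⊢
        simp [List.takeWhile_cons, hk, ← h2]
      · have h2 := ih
        rw [if_neg (by simpa using hc)] at h2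
        have hnc : ¬ ((k :: ks).contains 'T' = true) := by
          simp only [List.contains_cons, Bool.or_eq_true, beq_iff_eq, not_or]
          exact ⟨fun h => hk h.symm, by simpa using hc⟩
        rw [if_neg hnc]
        simp [List.takeWhile_cons, hk, h2]

theorem pv_take_takeWhile {α : Type} (p : α → Bool) (l : List α) :
    l.take ((l.takeWhile p).length) = l.takeWhile p := by
  induction l with
  | nil => rfl
  | cons a l ih =>
    by_cases hp : p a
    · simp [hp, ih]
    · simp [hp]

theorem pv_zip_takeWhile {α β : Type} (p : α → Bool) (f : α → β) (l : List α) :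
    (l.takeWhile p).zip (l.map f) = (l.takeWhile p).map (fun x => (x, f x)) := by
  induction l with
  | nil => rfl
  | cons a l ih =>
    by_cases hp : p a
    · simp [hp, ih]
    · simp [hp]

theorem pv_alt_eq_twoPass (ls : List (List Char)) :
    ((PySem.List.slice ls none (some ((if (ls.map pvClassify).contains 'T'
        then (PySem.List.index? (ls.map pvClassify) 'T').getD 0 else ls.length : Nat) : Int))).zip
      (ls.map pvClassify)).filterMap
      (fun p => if p.2 == 'C' then some (pvClean p.1) else none) = pvTwoPass ls := by
  have hc : ∀ ks : List Char, (if ks.contains 'T' then (PySem.List.index? ks 'T').getD 0 else ks.length) = (ks.takeWhile (fun k => k != 'T')).length := pv_cut_take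
  rw [show (if (ls.map pvClassify).contains 'T' then (PySem.List.index? (ls.map pvClassify) 'T').getD 0 else ls.length) = ((ls.map pvClassify).takeWhile (fun k => k != 'T')).length from by
        rw [← hc]; simp]
  rw [PySem.List.slice_to_natCast]
  rw [List.takeWhile_map, List.length_map, pv_take_takeWhile, pv_zip_takeWhile, List.filterMap_map]
  rfl

theorem pv_loop_eq_twoPass (ls : List (List Char)) :
    extract_header_comments_py_loop ls = pvTwoPass ls := by
  induction ls with
  | nil => rfl
  | cons line rest ih =>
    by_cases hq : PySem.Chars.startswith (PySem.Chars.strip line) ['#'] = true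
    · have hne : (PySem.Chars.strip line).isEmpty = false := by
        rcases (PySem.Chars.startswith_iff _ _).mp hq with ⟨t, ht⟩
        simp [List.isEmpty_iff, ← ht]
      have hcl : pvClassify line = 'C' := by simp [pvClassify, hne, hq]
      simp [extract_header_comments_py_loop, hq, pvTwoPass, List.takeWhile_cons, hcl, pvClean, ih]
    · by_cases hs : PySem.Chars.strip line = []
      · have hcl : pvClassify line = 'B' := by simp [pvClassify, hs]
        have hse : PySem.Chars.startswith ([] : List Char) ['#'] = false := by decide
        simp [extract_header_comments_py_loop, hs, hse, pvTwoPass, List.takeWhile_cons, hcl, ih]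
      · have hie : (PySem.Chars.strip line).isEmpty = false := by simp [List.isEmpty_iff, hs]
        have hcl : pvClassify line = 'T' := by simp [pvClassify, hie, hq]
        simp [extract_header_comments_py_loop, hq, hs, pvTwoPass, List.takeWhile_cons, hcl]

theorem pv_alt_eq (content : String) :
    extract_header_comments_py_alt content = pvTwoPass ((PySem.Str.splitlines content).map String.toList) :=
  pv_alt_eq_twoPass _

-- ===== VERDICT =====
theorem extract_header_comments_py_spec : Claim_equal_extract_header_comments_py := by
  intro content _
  unfold Spec_extract_header_comments_py extract_header_comments_py
  rw [pv_alt_eq]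
  exact pv_loop_eq_twoPass _
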